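-- pv_equiv track=rewrite | github.com/Suv1999/whatsapp-analysis- | helper.py | user_
-- ===== SOURCE A (Python) =====
-- def user_(x):                              # for total_ words function
--     total_words = []
--     for i in x:
--         j = i.split()
--         for i in j:
--             if i not in ['<Media', 'omitted>']:
--                 total_words.append(i)
--
--     return(total_words)
-- ===== SOURCE B (Python) =====
-- def user_(x):                              # for total_ words function
--     # Single character-level scan: a hand-rolled tokenizer state machine that
--     # emits each completed word unless it is one of the two media markers,
--     # instead of calling split() and filtering the resulting token lists.
--     total_words = []
--     for s in x:
--         cur = []
--         for ch in s + " ":                 # trailing space flushes the last word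
--             if ch.isspace():
--                 if cur:
--                     w = "".join(cur)
--                     if w != '<Media' and w != 'omitted>':
--                         total_words.append(w)
--                     cur = []
--             else:
--                 cur.append(ch)
--     return total_words
-- ===== Notes on version B (the rewrite author's own statement) =====
-- stated objective: alternative
-- what changed: B replaces A's split()-then-filter nested loops with a hand-written character-level tokenizer state machine: one scan per string builds each word char by char and emits it immediately unless it equals a marker, never materialising split()'s intermediate token lists.
import Mathlib
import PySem

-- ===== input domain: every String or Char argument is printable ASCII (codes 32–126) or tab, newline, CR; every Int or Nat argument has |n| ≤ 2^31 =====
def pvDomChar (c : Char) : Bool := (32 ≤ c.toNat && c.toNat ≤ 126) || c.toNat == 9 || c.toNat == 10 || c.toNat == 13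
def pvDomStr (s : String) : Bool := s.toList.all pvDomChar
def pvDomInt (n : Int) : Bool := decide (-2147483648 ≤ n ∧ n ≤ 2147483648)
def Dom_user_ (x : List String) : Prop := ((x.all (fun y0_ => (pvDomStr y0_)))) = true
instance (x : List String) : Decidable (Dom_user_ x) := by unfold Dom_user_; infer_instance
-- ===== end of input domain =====

-- B replaces A's split()-then-filter nested loops with a hand-written character-level
-- tokenizer state machine that emits each completed non-marker word immediately (alternative).


-- ===== PORT A =====
def user_ (x : List String) : List String :=
  x.foldl (fun total_words i =>
    (PySem.Str.split₀ i).foldl (fun tw w =>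
      if ¬ (w ∈ ["<Media", "omitted>"]) then tw ++ [w] else tw) total_words) []

-- ===== PORT B =====
-- character-level scan of one string (plus the trailing flush space appended by Source B)
def user_scanB : List Char → List Char → List String → List String
  | [], _, out => out
  | c :: rest, cur, out =>
    if PySem.Chars.isspace c then
      if cur.isEmpty then user_scanB rest cur out
      else
        let w := String.mk cur
        user_scanB rest [] (if w ≠ "<Media" ∧ w ≠ "omitted>" then out ++ [w] else out)
    else user_scanB rest (cur ++ [c]) out

def user__alt (x : List String) : List String :=
  x.foldl (fun out s => user_scanB (s.toList ++ [' ']) [] out) []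

-- ===== PRECONDITION & SPEC =====
def Spec_user_ (x : List String) (out : List String) : Prop := out = user__alt x
instance (x : List String) (out : List String) : Decidable (Spec_user_ x out) := by unfold Spec_user_; infer_instance

-- ===== CLAIM =====
def Claim_equal_user_ : Prop := ∀ (x : List String), Dom_user_ x → Spec_user_ x (user_ x)

-- ===== LEMMAS AND PROOFS =====

theorem go_acc (s cur : List Char) (acc : List (List Char)) :
    PySem.Chars.split₀.go s cur acc = acc.reverse ++ PySem.Chars.split₀.go s cur [] := by
  induction s generalizing cur acc with
  | nil => simp [PySem.Chars.split₀.go]; split_ifs <;> simp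
  | cons c rest ih =>
    simp only [PySem.Chars.split₀.go]
    split_ifs with h1 h2
    · rw [ih [] acc]
    · rw [ih [] (cur.reverse :: acc), ih [] [cur.reverse]]; simp
    · rw [ih (c :: cur) acc]

-- the streaming scan computes exactly "filter the words of split₀"
theorem scanB_eq (s : List Char) (cur : List Char) (out : List String) :
    user_scanB (s ++ [' ']) cur out =
      out ++ ((PySem.Chars.split₀.go s cur.reverse []).map String.mk).filter
        (fun w => decide (¬ (w ∈ ["<Media", "omitted>"]))) := by
  induction s generalizing cur out with
  | nil =>
    simp only [List.nil_append, user_scanB,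
      show PySem.Chars.isspace ' ' = true from by decide, if_pos]
    by_cases h : cur.isEmpty
    · rw [if_pos h]
      have : cur = [] := by simpa [List.isEmpty_iff] using h
      subst this
      simp [user_scanB, PySem.Chars.split₀.go]
    · rw [if_neg h]
      have hc : cur.reverse.isEmpty = false := by
        simp [List.isEmpty_iff] at h ⊢; exact h
      simp only [user_scanB, PySem.Chars.split₀.go, hc, Bool.false_eq_true, if_false,
        List.reverse_reverse]
      by_cases hm : String.mk cur = "<Media" ∨ String.mk cur = "omitted>"
      · have : ¬ (String.mk cur ≠ "<Media" ∧ String.mk cur ≠ "omitted>") := by tauto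
        rw [if_neg this]
        simp [List.filter, hm]
        rcases hm with hm | hm <;> simp [hm]
      · push_neg at hm
        rw [if_pos hm]
        simp [List.filter, hm.1, hm.2]
  | cons c rest ih =>
    simp only [List.cons_append, user_scanB, PySem.Chars.split₀.go]
    by_cases hsp : PySem.Chars.isspace c
    · rw [if_pos hsp, if_pos hsp]
      by_cases h : cur.isEmpty
      · have : cur = [] := by simpa [List.isEmpty_iff] using h
        subst this
        simp only [h, if_pos, List.reverse_nil, List.isEmpty_nil]
        exact ih [] out
      · have hc : cur.reverse.isEmpty = false := by
          simp [List.isEmpty_iff] at h ⊢; exact h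
        rw [if_neg h, hc]
        simp only [Bool.false_eq_true, if_false, List.reverse_reverse]
        rw [ih, go_acc rest [] [cur]]
        by_cases hm : String.mk cur = "<Media" ∨ String.mk cur = "omitted>"
        · have : ¬ (String.mk cur ≠ "<Media" ∧ String.mk cur ≠ "omitted>") := by tauto
          rw [if_neg this]
          simp only [List.reverse_cons, List.reverse_nil, List.nil_append, List.map_append,
            List.map_cons, List.map_nil, List.filter_append, List.filter]
          rcases hm with hm | hm <;> simp [hm]
        · push_neg at hm
          rw [if_pos hm]
          simp [List.filter, hm.1, hm.2]
    · rw [if_neg hsp, if_neg hsp, ih]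
      simp

theorem inner_foldl (ws : List String) (acc : List String) :
    ws.foldl (fun tw w => if ¬ (w ∈ ["<Media", "omitted>"]) then tw ++ [w] else tw) acc =
    acc ++ ws.filter (fun w => decide (¬ (w ∈ ["<Media", "omitted>"]))) := by
  induction ws generalizing acc with
  | nil => simp
  | cons w rest ih =>
    by_cases h : w ∈ ["<Media", "omitted>"]
    · rw [List.foldl_cons, if_neg (not_not_intro h),
        List.filter_cons_of_neg (by simp [h]), ih]
    · rw [List.foldl_cons, if_pos h, List.filter_cons_of_pos (by simpa using h), ih]
      simp

theorem scanB_str (s : String) (out : List String) :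
    user_scanB (s.toList ++ [' ']) [] out =
      out ++ (PySem.Str.split₀ s).filter
        (fun w => decide (¬ (w ∈ ["<Media", "omitted>"]))) := by
  rw [scanB_eq]
  rfl

theorem both_eq_flatMap (x : List String) :
    user_ x = user__alt x := by
  unfold user_ user__alt
  induction x using List.reverseRecOn with
  | nil => rfl
  | append_singleton rest s ih =>
    rw [List.foldl_append, List.foldl_append, List.foldl_cons, List.foldl_nil,
      List.foldl_cons, List.foldl_nil, ih, inner_foldl, scanB_str]

-- ===== VERDICT (by name: the statement is the Claim_ definition above) =====
theorem user__spec : Claim_equal_user_ := by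
  intro x _
  unfold Spec_user_
  exact both_eq_flatMap x
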